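-- pv_equiv track=rewrite | github.com/Sesuu2003/Lenguaje-Matescript | AnalizadorLexico.py | esEntero
-- ===== SOURCE A (Python) =====
-- from enum import Enum  # TAS Panda
--
-- class Sigma(Enum):
--     LETRA = "Letra"
--     DIGITO = "Digito"
--     CESPECIAL = "Caracter especial"
--     OPREL = "OpRel"
--     OPARITMETICO = "OpAritmetico"
--     COMILLAS = "Comillas"
--     PUNTO = "Punto"
--     OTRO = "Otro"
--
-- CARACTERES_ESPECIALES = {'_','@','#', '$', '%', '&','¿','?','¡', '!','|','°',' '}
--
-- OPERADORES_RELACIONALES = {'>','<','='}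
--
-- OPERADORES_ARITMETICOS = {'-','+','*','/','^'}
--
-- def car_a_simb(car):
--     if car == '"':
--         return Sigma.COMILLAS.value
--     elif car.isalpha():
--         return Sigma.LETRA.value
--     elif car.isdigit():
--         return Sigma.DIGITO.value
--     elif car in CARACTERES_ESPECIALES:
--         return Sigma.CESPECIAL.value
--     elif car in OPERADORES_RELACIONALES:
--         return Sigma.OPREL.value
--     elif car in OPERADORES_ARITMETICOS:
--         return Sigma.OPARITMETICO.value
--     elif car == '.':
--         return Sigma.PUNTO.value
--     else:
--         return Sigma.OTRO.value
--
-- class SigmaEntero(Enum):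
--      DIGITO = "Digito"
--      OTRO = "Otro"
--
-- def esEntero(cadena:str) -> bool:
--     q0 = 0
--     F = {1}
--
--     # Q = {0,1,2}
--     Delta = {
--         (0, SigmaEntero.DIGITO.value): 1,
--         (0, SigmaEntero.OTRO.value): 2,
--
--         (1, SigmaEntero.DIGITO.value): 1,
--         (1, SigmaEntero.OTRO.value): 2,
--
--     }
--     estado_actual = q0
--     i = 0
--     while estado_actual != 2 and not(i > len(cadena)-1):
--         simbolo = car_a_simb(cadena[i])
--         if simbolo != SigmaEntero.DIGITO.value:
--             simbolo = SigmaEntero.OTRO.value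
--         estado_actual = Delta.get((estado_actual,simbolo),estado_actual)
--         i +=1
--
--     return estado_actual in F
-- ===== SOURCE B (Python) =====
-- def esEntero(cadena: str) -> bool:
--     return cadena.isdigit()
-- ===== Notes on version B (the rewrite author's own statement) =====
-- stated objective: idiomatic
-- what changed: Replaced the explicit DFA (state variable, Delta transition table, while-loop over indices, car_a_simb classifier) with the single built-in call cadena.isdigit(), which accepts exactly the same language: non-empty strings of digits.
import Mathlib
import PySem

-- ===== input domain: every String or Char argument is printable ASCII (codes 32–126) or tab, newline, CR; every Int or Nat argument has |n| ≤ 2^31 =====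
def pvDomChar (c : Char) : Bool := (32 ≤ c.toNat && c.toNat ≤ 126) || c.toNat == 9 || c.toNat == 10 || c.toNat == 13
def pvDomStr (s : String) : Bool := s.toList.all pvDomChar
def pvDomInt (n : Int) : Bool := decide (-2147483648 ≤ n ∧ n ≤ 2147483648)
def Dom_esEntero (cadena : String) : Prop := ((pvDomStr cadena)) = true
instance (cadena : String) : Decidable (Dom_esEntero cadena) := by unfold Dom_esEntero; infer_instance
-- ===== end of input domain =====

-- B replaces A's explicit DFA (state variable, Delta table, index loop) with the single
-- built-in cadena.isdigit(); same O(n) cost, one library call instead of a state machine.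

-- ===== PORT A =====
-- same-module sets used by car_a_simb
def pvCaracteresEspeciales : PySem.Set Char :=
  PySem.Set.ofList ['_','@','#','$','%','&','¿','?','¡','!','|','°',' ']
def pvOperadoresRelacionales : PySem.Set Char := PySem.Set.ofList ['>','<','=']
def pvOperadoresAritmeticos : PySem.Set Char := PySem.Set.ofList ['-','+','*','/','^']

-- port of car_a_simb (Enum .value is its String)
def carASimb (car : Char) : String :=
  if car = '"' then "Comillas"
  else if PySem.Chars.isalpha car then "Letra"
  else if PySem.Chars.isdigit car then "Digito"
  else if pvCaracteresEspeciales.contains car then "Caracter especial"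
  else if pvOperadoresRelacionales.contains car then "OpRel"
  else if pvOperadoresAritmeticos.contains car then "OpAritmetico"
  else if car = '.' then "."  -- Sigma.PUNTO.value is "Punto"
  else "Otro"

-- the Delta dict, literally
def pvDelta : PySem.Dict (Int × String) Int :=
  (((PySem.Dict.empty.insert (0, "Digito") 1).insert (0, "Otro") 2).insert
      (1, "Digito") 1).insert (1, "Otro") 2

-- the while loop: 'while estado ≠ 2 and i ≤ len-1' over the remaining characters
def esEnteroLoop (estado : Int) (cs : List Char) : Int :=
  match cs with
  | [] => estado
  | c :: rest =>
    if estado ≠ 2 then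
      let simbolo := carASimb c
      let simbolo := if simbolo ≠ "Digito" then "Otro" else simbolo
      esEnteroLoop (pvDelta.getD (estado, simbolo) estado) rest
    else estado

def esEntero (cadena : String) : Bool :=
  esEnteroLoop 0 cadena.toList == 1

-- ===== PORT B =====
def esEntero_alt (cadena : String) : Bool := PySem.Str.strIsdigit cadena

-- ===== PRECONDITION & SPEC =====
def Spec_esEntero (cadena : String) (out : Bool) : Prop := out = esEntero_alt cadena
instance (cadena : String) (out : Bool) : Decidable (Spec_esEntero cadena out) := by unfold Spec_esEntero; infer_instance

-- ===== CLAIM (what is proved, stated in full; the proofs are below) =====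
def Claim_equal_esEntero : Prop := ∀ (cadena : String), Dom_esEntero cadena → Spec_esEntero cadena (esEntero cadena)

-- ===== LEMMAS AND PROOFS =====

-- the four entries of the Delta table, evaluated
theorem delta_0d : pvDelta.getD (0, "Digito") 0 = 1 := rfl
theorem delta_0o : pvDelta.getD (0, "Otro") 0 = 2 := rfl
theorem delta_1d : pvDelta.getD (1, "Digito") 1 = 1 := rfl
theorem delta_1o : pvDelta.getD (1, "Otro") 1 = 2 := rfl

-- car_a_simb names a char "Digito" exactly on '0'..'9'
theorem carASimb_digito (c : Char) : (carASimb c = "Digito") ↔ PySem.Chars.isdigit c = true := by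
  unfold carASimb
  by_cases h2 : PySem.Chars.isalpha c = true
  · have hd : PySem.Chars.isdigit c = false := by
      revert h2
      simp [PySem.Chars.isalpha, PySem.Chars.isupper, PySem.Chars.islower,
            PySem.Chars.isdigit, Char.le_def, UInt32.le_iff_toNat_le]
      omega
    simp [h2, hd]
    split_ifs <;> simp
  · by_cases h3 : PySem.Chars.isdigit c = true
    · simp [h2, h3]
      intro h1; subst h1; revert h3; decide
    · simp [h3]
      split_ifs <;> simp_all

-- once in state 2 the loop is stuck
theorem loop_two (cs : List Char) : esEnteroLoop 2 cs = 2 := by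
  cases cs <;> simp [esEnteroLoop]

-- in state 1, the loop ends in state 1 iff every remaining char is a digit
theorem loop_one (cs : List Char) :
    esEnteroLoop 1 cs = (if cs.all PySem.Chars.isdigit then 1 else 2) := by
  induction cs with
  | nil => simp [esEnteroLoop]
  | cons c rest ih =>
    by_cases hd : PySem.Chars.isdigit c = true
    · have hs : carASimb c = "Digito" := (carASimb_digito c).mpr hd
      simp [esEnteroLoop, hs, delta_1d, ih, hd]
    · have hs : carASimb c ≠ "Digito" := fun h => hd ((carASimb_digito c).mp h)
      simp [esEnteroLoop, hs, delta_1o, loop_two, hd]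

-- ===== VERDICT (by name: the statement is the Claim_ definition above) =====
theorem esEntero_spec : Claim_equal_esEntero := by
  intro cadena _
  unfold Spec_esEntero esEntero esEntero_alt
  rw [PySem.Str.strIsdigit_eq]
  unfold PySem.Chars.strIsdigit
  cases h : cadena.toList with
  | nil => simp [esEnteroLoop]
  | cons c rest =>
    by_cases hd : PySem.Chars.isdigit c = true
    · have hs : carASimb c = "Digito" := (carASimb_digito c).mpr hd
      simp [esEnteroLoop, hs, delta_0d, loop_one, hd]
      split_ifs <;> simp_all
    · have hs : carASimb c ≠ "Digito" := fun h => hd ((carASimb_digito c).mp h)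
      simp [esEnteroLoop, hs, delta_0o, loop_two, hd]
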